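-- pv_equiv track=rewrite | github.com/ravishfayyaz555/todo-app-phase-III-chatbot | simple_test_command_detection.py | simulate_command_detection
-- ===== SOURCE A (Python) =====
-- def simulate_command_detection(message):
--     """Simulate the logic from the fixed _handle_todo_command method."""
--     message_lower = message.lower()
--
--     # Check for delete command first (more specific)
--     if any(word in message_lower for word in ['delete', 'remove']) and any(word in message_lower for word in ['todo', 'task']):
--         return "delete"
--
--     # Create a new todo (prioritize creation over completion when both keywords are present)
--     elif any(word in message_lower for word in ['create', 'add', 'new', 'make']) and any(word in message_lower for word in ['todo', 'task']):
--         return "create"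
--
--     # Check for completion commands (only if not a creation command)
--     elif any(word in message_lower for word in ['complete', 'finish', 'done', 'mark']) and any(word in message_lower for word in ['todo', 'task']):
--         return "complete"
--
--     # Check for show/list commands
--     elif any(word in message_lower for word in ['show', 'list', 'view', 'get']) and any(word in message_lower for word in ['todo', 'task', 'todos', 'tasks']):
--         return "show"
--
--     else:
--         return "other"
-- ===== SOURCE B (Python) =====
-- # B: single noun check + one flat verb->label table, replacing four hard-coded branches.
-- _VERB_LABELS = [
--     ('delete', 'delete'), ('remove', 'delete'),
--     ('create', 'create'), ('add', 'create'), ('new', 'create'), ('make', 'create'),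
--     ('complete', 'complete'), ('finish', 'complete'), ('done', 'complete'), ('mark', 'complete'),
--     ('show', 'show'), ('list', 'show'), ('view', 'show'), ('get', 'show'),
-- ]
--
-- def simulate_command_detection(message):
--     m = message.lower()
--     if 'todo' not in m and 'task' not in m:
--         return 'other'
--     for verb, label in _VERB_LABELS:
--         if verb in m:
--             return label
--     return 'other'
-- ===== Notes on version B (the rewrite author's own statement) =====
-- stated objective: simpler
-- what changed: The four hard-coded elif branches, each with its own verb list and a repeated noun check, become one noun check done once plus a first-match scan over a flat verb->label table (show's redundant extra nouns 'todos'/'tasks' drop out since they contain 'todo'/'task' as substrings).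
import Mathlib
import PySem

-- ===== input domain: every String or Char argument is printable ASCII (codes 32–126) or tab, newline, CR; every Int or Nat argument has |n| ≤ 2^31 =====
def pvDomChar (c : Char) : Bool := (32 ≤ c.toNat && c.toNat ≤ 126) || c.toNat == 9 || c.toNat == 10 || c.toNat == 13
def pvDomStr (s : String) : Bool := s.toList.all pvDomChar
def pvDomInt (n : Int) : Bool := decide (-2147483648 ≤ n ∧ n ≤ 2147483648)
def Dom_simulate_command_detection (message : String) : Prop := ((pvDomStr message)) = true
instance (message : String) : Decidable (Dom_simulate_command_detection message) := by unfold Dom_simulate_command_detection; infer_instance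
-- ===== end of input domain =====

-- B replaces A's four hard-coded elif branches by one noun check plus a flat verb→label table (simpler, same cost).


-- ===== PORT A =====
def simulate_command_detection (message : String) : String :=
  let m := PySem.Str.lower message
  if (["delete", "remove"].any fun w => PySem.Str.isIn w m) &&
     (["todo", "task"].any fun w => PySem.Str.isIn w m) then "delete"
  else if (["create", "add", "new", "make"].any fun w => PySem.Str.isIn w m) &&
          (["todo", "task"].any fun w => PySem.Str.isIn w m) then "create"
  else if (["complete", "finish", "done", "mark"].any fun w => PySem.Str.isIn w m) &&
          (["todo", "task"].any fun w => PySem.Str.isIn w m) then "complete"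
  else if (["show", "list", "view", "get"].any fun w => PySem.Str.isIn w m) &&
          (["todo", "task", "todos", "tasks"].any fun w => PySem.Str.isIn w m) then "show"
  else "other"

-- ===== PORT B =====
def pvVerbLabels : List (String × String) :=
  [("delete", "delete"), ("remove", "delete"),
   ("create", "create"), ("add", "create"), ("new", "create"), ("make", "create"),
   ("complete", "complete"), ("finish", "complete"), ("done", "complete"), ("mark", "complete"),
   ("show", "show"), ("list", "show"), ("view", "show"), ("get", "show")]

def pvFindLabel (m : String) : List (String × String) → String
  | [] => "other"
  | (v, l) :: rest => if PySem.Str.isIn v m then l else pvFindLabel m rest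

def simulate_command_detection_alt (message : String) : String :=
  let m := PySem.Str.lower message
  if !(PySem.Str.isIn "todo" m || PySem.Str.isIn "task" m) then "other"
  else pvFindLabel m pvVerbLabels

-- ===== PRECONDITION & SPEC =====
def Spec_simulate_command_detection (message : String) (out : String) : Prop := out = simulate_command_detection_alt message
instance (message : String) (out : String) : Decidable (Spec_simulate_command_detection message out) := by unfold Spec_simulate_command_detection; infer_instance

-- ===== CLAIM (what is proved, stated in full; the proofs are below) =====
def Claim_equal_simulate_command_detection : Prop := ∀ (message : String), Dom_simulate_command_detection message → Spec_simulate_command_detection message (simulate_command_detection message)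

-- ===== LEMMAS AND PROOFS =====

-- 'if (a || b) then x else t' splits into a flat chain — the bridge from A's grouped verb tests to B's table scan.
theorem pv_if_or (a b : Bool) (x t : String) :
    (if (a || b) then x else t) = (if a then x else if b then x else t) := by
  cases a <;> simp

-- substring monotonicity: sub' a prefix of sub, sub in m → sub' in m
theorem pv_isIn_of_prefix {sub' sub : String} (m : String)
    (hp : sub'.toList <+: sub.toList) (h : PySem.Str.isIn sub m = true) :
    PySem.Str.isIn sub' m = true := by
  rw [PySem.Str.isIn_iff_infix] at h ⊢
  exact hp.isInfix.trans h

theorem pv_eq (message : String) :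
    simulate_command_detection message = simulate_command_detection_alt message := by
  unfold simulate_command_detection simulate_command_detection_alt
  set m := PySem.Str.lower message with hm
  by_cases ht : (PySem.Str.isIn "todo" m || PySem.Str.isIn "task" m) = true
  · have ht4 : (PySem.Str.isIn "todo" m ||
        (PySem.Str.isIn "task" m ||
          (PySem.Str.isIn "todos" m || PySem.Str.isIn "tasks" m))) = true := by
      cases h1 : PySem.Str.isIn "todo" m <;> cases h2 : PySem.Str.isIn "task" m <;> simp_all
    simp only [List.any_cons, List.any_nil, Bool.or_false, ht, ht4, Bool.and_true,
      Bool.not_true, pvFindLabel, pvVerbLabels, pv_if_or, if_false, Bool.false_eq_true]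
  · have htd : PySem.Str.isIn "todo" m = false := by
      cases h : PySem.Str.isIn "todo" m <;> simp_all
    have hta : PySem.Str.isIn "task" m = false := by
      cases h : PySem.Str.isIn "task" m <;> simp_all
    have htds : PySem.Str.isIn "todos" m = false := by
      cases h : PySem.Str.isIn "todos" m
      · rfl
      · exact absurd (pv_isIn_of_prefix (sub' := "todo") (sub := "todos") m (by decide) h) (by simpa using htd)
    have htas : PySem.Str.isIn "tasks" m = false := by
      cases h : PySem.Str.isIn "tasks" m
      · rfl
      · exact absurd (pv_isIn_of_prefix (sub' := "task") (sub := "tasks") m (by decide) h) (by simpa using hta)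
    simp_all

-- ===== VERDICT (by name: the statement is the Claim_ definition above) =====
theorem simulate_command_detection_spec : Claim_equal_simulate_command_detection := by
  intro message _
  exact pv_eq message
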